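-- pv_equiv track=rewrite | github.com/vinnses/sigils | spells/zotcli/lib/navigator.py | _find_item_by_ref
-- ===== SOURCE A (Python) =====
-- def _find_item_by_ref(items, ref):
--     """Find item by citation key, item key, or exact title. Returns dict or None."""
--     for item in items:
--         data = item.get("data", item)
--         ck = _get_citation_key(data)
--         if ck and ck == ref:
--             return item
--     for item in items:
--         if item.get("data", item).get("key") == ref:
--             return item
--     for item in items:
--         if item.get("data", item).get("title", "") == ref:
--             return item
--     return None
--
-- def _get_citation_key(item_data):
--     if "citationKey" in item_data:
--         return item_data["citationKey"]
--     extra = item_data.get("extra", "")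
--     if extra:
--         for line in extra.splitlines():
--             if line.lower().startswith("citation key:"):
--                 return line.split(":", 1)[1].strip()
--     return None
-- ===== SOURCE B (Python) =====
-- def _find_item_by_ref(items, ref):
--     """Single pass: return at once on a citation-key match (priority 1);
--     otherwise keep the earliest item of the best (lowest) priority seen
--     (2 = key match, 3 = title match) and return it after the loop."""
--     best = None
--     best_prio = 4
--     for item in items:
--         data = item.get("data", item)
--         ck = _get_citation_key(data)
--         if ck and ck == ref:
--             return item
--         if data.get("key") == ref:
--             prio = 2
--         elif data.get("title", "") == ref:
--             prio = 3
--         else: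
--             prio = 4
--         if prio < best_prio:
--             best = item
--             best_prio = prio
--     return best
--
-- def _get_citation_key(item_data):
--     if "citationKey" in item_data:
--         return item_data["citationKey"]
--     extra = item_data.get("extra", "")
--     if extra:
--         for line in extra.splitlines():
--             if line.lower().startswith("citation key:"):
--                 return line.split(":", 1)[1].strip()
--     return None
-- ===== Notes on version B (the rewrite author's own statement) =====
-- stated objective: alternative
-- what changed: Replaces A's three sequential passes over items with a single pass that returns immediately on a citation-key match and otherwise tracks the earliest item of the best priority (key match before title match), returning it after the loop.
import Mathlib
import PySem

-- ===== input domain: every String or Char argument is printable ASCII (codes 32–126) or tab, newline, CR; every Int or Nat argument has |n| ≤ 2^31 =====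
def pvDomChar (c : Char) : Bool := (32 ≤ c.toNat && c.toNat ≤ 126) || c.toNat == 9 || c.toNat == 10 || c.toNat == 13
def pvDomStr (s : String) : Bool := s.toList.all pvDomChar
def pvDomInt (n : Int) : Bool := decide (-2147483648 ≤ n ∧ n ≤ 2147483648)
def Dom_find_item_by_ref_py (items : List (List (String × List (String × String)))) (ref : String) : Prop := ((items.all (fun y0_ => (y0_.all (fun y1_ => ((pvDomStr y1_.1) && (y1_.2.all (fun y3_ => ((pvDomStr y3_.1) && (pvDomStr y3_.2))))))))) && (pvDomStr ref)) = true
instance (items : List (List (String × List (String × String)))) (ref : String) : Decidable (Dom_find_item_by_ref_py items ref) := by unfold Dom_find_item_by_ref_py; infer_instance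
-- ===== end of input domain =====

-- B replaces A's three sequential passes with one pass that returns at once on a
-- citation-key match and otherwise tracks the earliest item of the best priority
-- (key match before title match); an alternative decomposition, same cost.

-- ===== PORT A =====

-- first-match association-list lookup = dict.get (Python dicts here are assoc lists)
def pvGet? {β : Type} (d : List (String × β)) (k : String) : Option β :=
  (PySem.Dict.mk d).get? k

-- the 'for line in extra.splitlines(): …' loop of _get_citation_key
def pvScanCK : List String → Option String
  | [] => none
  | line :: rest =>
    if PySem.Str.startswith (PySem.Str.lower line) "citation key:" then
      -- line.split(":", 1)[1].strip(); exact: the guard guarantees a ':' in line, so the split has a part 1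
      some (PySem.Str.strip ((PySem.List.pyGet? ((PySem.Str.splitMax? line ":" 1).getD []) 1).getD ""))
    else pvScanCK rest

-- _get_citation_key(item_data) for a proper str→str dict
def pvGetCitationKey (data : List (String × String)) : Option String :=
  match pvGet? data "citationKey" with
  | some v => some v
  | none =>
    let extra := (pvGet? data "extra").getD ""
    if extra ≠ "" then pvScanCK (PySem.Str.splitlines extra) else none

-- pass-1 test: ck truthy and equal to ref.  When "data" is absent, Python's data is the
-- item itself (a str→dict dict): ck is then a dict or None, never equal to the string ref,
-- so no match (exact; the case where that fallback RAISES on a nonempty "extra" dict is outside Pre_).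
def pvMatch1 (ref : String) (item : List (String × List (String × String))) : Bool :=
  match pvGet? item "data" with
  | some data =>
    match pvGetCitationKey data with
    | some ck => ck ≠ "" && ck == ref
    | none => false
  | none => false

-- pass-2 test: item.get("data", item).get("key") == ref.  Without "data" the value is a
-- dict or None, never equal to the string ref (exact).
def pvMatch2 (ref : String) (item : List (String × List (String × String))) : Bool :=
  match pvGet? item "data" with
  | some data => pvGet? data "key" == some ref
  | none => false

-- pass-3 test: item.get("data", item).get("title", "") == ref.  Without "data": a present
-- "title" is a dict (never equal to the string ref); an absent one compares "" == ref (exact).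
def pvMatch3 (ref : String) (item : List (String × List (String × String))) : Bool :=
  match pvGet? item "data" with
  | some data => (pvGet? data "title").getD "" == ref
  | none => pvGet? item "title" == none && ref == ""

def find_item_by_ref_py (items : List (List (String × List (String × String)))) (ref : String) : Option (List (String × List (String × String))) :=
  match items.find? (pvMatch1 ref) with
  | some it => some it
  | none =>
    match items.find? (pvMatch2 ref) with
    | some it => some it
    | none => items.find? (pvMatch3 ref)

-- ===== PORT B =====

-- B's per-item classification (the if/elif chain of Source B), priorities 1–4; the
-- "data"-absent fallback is exact for the same reasons as in port A above.
def pvClassify (ref : String) (item : List (String × List (String × String))) : Nat :=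
  match pvGet? item "data" with
  | some data =>
    if (match pvGetCitationKey data with
        | some ck => ck ≠ "" && ck == ref
        | none => false) then 1
    else if pvGet? data "key" == some ref then 2
    else if (pvGet? data "title").getD "" == ref then 3
    else 4
  | none => if pvGet? item "title" == none && ref == "" then 3 else 4

-- B's single loop: immediate return on priority 1, else keep the earliest best
def pvLoopB (ref : String) : List (List (String × List (String × String))) → Option (List (String × List (String × String))) → Nat → Option (List (String × List (String × String)))
  | [], best, _ => best
  | item :: rest, best, bp =>
    let p := pvClassify ref item
    if p = 1 then some item
    else if p < bp then pvLoopB ref rest (some item) p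
    else pvLoopB ref rest best bp

def find_item_by_ref_py_alt (items : List (List (String × List (String × String)))) (ref : String) : Option (List (String × List (String × String))) :=
  pvLoopB ref items none 4

-- ===== PRECONDITION & SPEC =====
-- Pre_ excludes inputs containing an item with no "data" and no "citationKey" key but a
-- nonempty "extra" value: on these A (and B) call .splitlines() on a dict and raise
-- AttributeError — except when an earlier citation-key match returns first, an excluded
-- corner on which A still returns (cited in claim.json; both programs return the same there).
def Pre_find_item_by_ref_py (items : List (List (String × List (String × String)))) (ref : String) : Prop :=
  ∀ item ∈ items, (pvGet? item "data" == none && pvGet? item "citationKey" == none && !((pvGet? item "extra").getD []).isEmpty) = false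
instance (items : List (List (String × List (String × String)))) (ref : String) : Decidable (Pre_find_item_by_ref_py items ref) := by unfold Pre_find_item_by_ref_py; infer_instance

def pvWitness_find_item_by_ref_py : (List (List (String × List (String × String)))) × String :=
  ([[("data", [("citationKey", "x")])]], "x")

def Spec_find_item_by_ref_py (items : List (List (String × List (String × String)))) (ref : String) (out : Option (List (String × List (String × String)))) : Prop := out = find_item_by_ref_py_alt items ref
instance (items : List (List (String × List (String × String)))) (ref : String) (out : Option (List (String × List (String × String)))) : Decidable (Spec_find_item_by_ref_py items ref out) := by unfold Spec_find_item_by_ref_py; infer_instance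

-- ===== CLAIM (what is proved, stated in full; the proofs are below) =====
def Claim_equal_find_item_by_ref_py : Prop := ∀ (items : List (List (String × List (String × String)))) (ref : String), Dom_find_item_by_ref_py items ref → Pre_find_item_by_ref_py items ref → Spec_find_item_by_ref_py items ref (find_item_by_ref_py items ref)

-- ===== LEMMAS AND PROOFS =====

-- B's classification expressed through A's three pass predicates
theorem pvClassify_char (ref : String) (item : List (String × List (String × String))) :
    pvClassify ref item =
      (if pvMatch1 ref item then 1 else if pvMatch2 ref item then 2
       else if pvMatch3 ref item then 3 else 4) := by
  unfold pvClassify pvMatch1 pvMatch2 pvMatch3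
  cases pvGet? item "data" <;> simp

-- the loop invariant: pvLoopB against the three-pass result, for the reachable states
theorem pvLoopB_spec (ref : String) (l : List (List (String × List (String × String))))
    (best : Option (List (String × List (String × String)))) (bp : Nat)
    (h : bp = 2 ∨ bp = 3 ∨ bp = 4) :
    pvLoopB ref l best bp =
      match l.find? (pvMatch1 ref) with
      | some x => some x
      | none =>
        if bp ≤ 2 then best
        else match l.find? (pvMatch2 ref) with
          | some x => some x
          | none =>
            if bp ≤ 3 then best
            else match l.find? (pvMatch3 ref) with
              | some x => some x
              | none => best := by
  induction l generalizing best bp with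
  | nil =>
    rcases h with h | h | h <;> subst h <;> simp [pvLoopB]
  | cons item rest ih =>
    rw [pvLoopB, pvClassify_char]
    by_cases h1 : pvMatch1 ref item
    · simp [h1, List.find?_cons]
    · by_cases h2 : pvMatch2 ref item
      · rcases h with h | h | h <;> subst h <;>
          simp [h1, h2, List.find?_cons, ih _ _ (by omega : (2:Nat) = 2 ∨ 2 = 3 ∨ 2 = 4)]
      · by_cases h3 : pvMatch3 ref item
        · rcases h with h | h | h <;> subst h <;>
            simp [h1, h2, h3, List.find?_cons, ih,
              ih _ _ (by omega : (3:Nat) = 2 ∨ 3 = 3 ∨ 3 = 4)] <;>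
            cases rest.find? (pvMatch1 ref) <;> simp
        · rcases h with h | h | h <;> subst h
          · simp [h1, h2, h3, List.find?_cons, ih _ _ (by omega : (2:Nat) = 2 ∨ 2 = 3 ∨ 2 = 4)]
          · simp [h1, h2, h3, List.find?_cons, ih _ _ (by omega : (3:Nat) = 2 ∨ 3 = 3 ∨ 3 = 4)]
          · simp [h1, h2, h3, List.find?_cons, ih _ _ (by omega : (4:Nat) = 2 ∨ 4 = 3 ∨ 4 = 4)]

-- ===== VERDICT (by name: the statement is the Claim_ definition above) =====
theorem find_item_by_ref_py_spec : Claim_equal_find_item_by_ref_py := by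
  intro items ref _ _
  unfold Spec_find_item_by_ref_py find_item_by_ref_py find_item_by_ref_py_alt
  rw [pvLoopB_spec ref items none 4 (by omega)]
  simp only [show ¬((4:Nat) ≤ 2) by omega, show ¬((4:Nat) ≤ 3) by omega, ite_false]
  cases items.find? (pvMatch1 ref) <;> cases items.find? (pvMatch2 ref) <;>
    cases items.find? (pvMatch3 ref) <;> rfl
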